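-- pv_equiv track=rewrite | github.com/HmbleCreator/ddin-reservoir | Experiments/ddin_exp42_pingala_mi_audit.py | compute_pingala_address
-- ===== SOURCE A (Python) =====
-- LONG_VOWELS = set('AEIOUfF')
--
-- SHORT_VOWELS = set('aiux')
--
-- CONSONANTS = set('kKgGNcCjJYwWqQRtTdDnpPbBmyrlvSzsSh')
--
-- def compute_pingala_address(root_slp1, max_syllables=4):
--
--
--     chars = list(root_slp1)
--
--
--     syllables = []
--
--
--     i = 0
--
--
--     while i < len(chars):
--
--
--         c = chars[i]
--
--
--         if c in LONG_VOWELS or c in SHORT_VOWELS: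
--
--
--             is_guru = c in LONG_VOWELS
--
--
--             j = i + 1
--
--
--             cluster = 0
--
--
--             while j < len(chars) and chars[j] in CONSONANTS:
--
--
--                 cluster += 1
--
--
--                 j += 1
--
--
--             if cluster > 1:
--
--
--                 is_guru = True
--
--
--             syllables.append(1 if is_guru else 0)
--
--
--             i = j
--
--
--         else:
--
--
--             i += 1
--
--
--     addr = syllables[:max_syllables]
--
--
--     while len(addr) < max_syllables:
--
--
--         addr.append(0)
--
--
--     return tuple(addr)
-- ===== SOURCE B (Python) =====
-- LONG_VOWELS_STR = 'AEIOUfF'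
-- VOWELS_STR = 'AEIOUfFaiux'
-- CONSONANTS_STR = 'kKgGNcCjJYwWqQRtTdDnpPbBmyrlvSzsSh'
--
-- def compute_pingala_address(root_slp1, max_syllables=4):
--     # one-pass state machine: carry (is_long, cluster_count) for the open syllable
--     weights = []
--     pending = None
--     for c in root_slp1:
--         if c in VOWELS_STR:
--             if pending is not None:
--                 weights.append(1 if pending[0] or pending[1] > 1 else 0)
--             pending = (c in LONG_VOWELS_STR, 0)
--         elif pending is not None and c in CONSONANTS_STR:
--             pending = (pending[0], pending[1] + 1)
--         else:
--             if pending is not None: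
--                 weights.append(1 if pending[0] or pending[1] > 1 else 0)
--             pending = None
--     if pending is not None:
--         weights.append(1 if pending[0] or pending[1] > 1 else 0)
--     addr = weights[:max_syllables]
--     return tuple(addr + [0] * (max_syllables - len(addr)))
-- ===== Notes on version B (the rewrite author's own statement) =====
-- stated objective: alternative
-- what changed: Replaced A's index-based two-pointer scan (outer while with an inner consonant-counting while and a catch-up pad loop) by a single left-to-right state-machine fold carrying the open syllable's (is_long, cluster_count), with truncate-and-pad done by slice + list arithmetic.
import Mathlib
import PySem

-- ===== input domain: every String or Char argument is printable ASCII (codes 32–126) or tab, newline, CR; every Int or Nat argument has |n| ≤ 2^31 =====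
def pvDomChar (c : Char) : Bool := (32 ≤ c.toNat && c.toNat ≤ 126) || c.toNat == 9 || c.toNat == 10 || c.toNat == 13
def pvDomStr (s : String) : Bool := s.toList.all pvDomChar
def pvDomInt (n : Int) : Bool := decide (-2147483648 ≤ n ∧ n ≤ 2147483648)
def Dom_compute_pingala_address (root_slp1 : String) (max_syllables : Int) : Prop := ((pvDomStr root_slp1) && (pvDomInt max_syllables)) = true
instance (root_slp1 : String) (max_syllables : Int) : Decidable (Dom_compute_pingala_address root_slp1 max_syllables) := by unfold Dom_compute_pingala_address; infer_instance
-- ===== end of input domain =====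

-- B swaps A's index-based two-pointer scan for a single state-machine fold; return value only, no side effects.

-- shared module-level character-class constants (the module's LONG_VOWELS / SHORT_VOWELS / CONSONANTS sets)
def pvLongVowels : List Char := ['A','E','I','O','U','f','F']
def pvShortVowels : List Char := ['a','i','u','x']
def pvConsonants : List Char := ['k','K','g','G','N','c','C','j','J','Y','w','W','q','Q','R','t','T','d','D','n','p','P','b','B','m','y','r','l','v','S','z','s','S','h']

-- ===== PORT A =====
-- inner while: count of consecutive consonants at the front (the j pointer advance)
def pvClusterA : List Char → Nat
  | [] => 0
  | c :: r => if c ∈ pvConsonants then pvClusterA r + 1 else 0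

-- outer while over the remaining character list (the i / i = j index jumps become drops)
def pvLoopA : List Char → List Int
  | [] => []
  | c :: rest =>
    if c ∈ pvLongVowels ∨ c ∈ pvShortVowels then
      (if decide (c ∈ pvLongVowels) || decide (pvClusterA rest > 1) then (1 : Int) else 0)
        :: pvLoopA (rest.drop (pvClusterA rest))
    else pvLoopA rest
  termination_by l => l.length
  decreasing_by
    all_goals simp [List.length_drop]
    all_goals omega

-- trailing while: append zeros until len(addr) = max_syllables
def pvPadA (addr : List Int) (m : Int) : List Int :=
  if (addr.length : Int) < m then pvPadA (addr ++ [(0 : Int)]) m else addr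
  termination_by (m - addr.length).toNat
  decreasing_by simp; omega

def compute_pingala_address (root_slp1 : String) (max_syllables : Int) : List Int :=
  pvPadA (PySem.List.slice (pvLoopA root_slp1.toList) none (some max_syllables)) max_syllables

-- ===== PORT B =====
def pvVowelsB : List Char := ['A','E','I','O','U','f','F','a','i','u','x']

def pvWeightB (p : Bool × Nat) : Int := if p.1 || decide (p.2 > 1) then 1 else 0

-- flush the open syllable, if any
def pvFlushB (w : List Int) (p : Option (Bool × Nat)) : List Int :=
  match p with
  | none => w
  | some q => w ++ [pvWeightB q]

-- one fold step of the state machine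
def pvStepB (st : List Int × Option (Bool × Nat)) (c : Char) : List Int × Option (Bool × Nat) :=
  if c ∈ pvVowelsB then
    (pvFlushB st.1 st.2, some (decide (c ∈ pvLongVowels), 0))
  else
    match st.2 with
    | some (lg, cnt) =>
        if c ∈ pvConsonants then (st.1, some (lg, cnt + 1))
        else (st.1 ++ [pvWeightB (lg, cnt)], none)
    | none => (st.1, none)

def compute_pingala_address_alt (root_slp1 : String) (max_syllables : Int) : List Int :=
  PySem.List.slice (pvFlushB (root_slp1.toList.foldl pvStepB ([], none)).1
      (root_slp1.toList.foldl pvStepB ([], none)).2) none (some max_syllables)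
    ++ List.replicate (max_syllables -
        (PySem.List.slice (pvFlushB (root_slp1.toList.foldl pvStepB ([], none)).1
          (root_slp1.toList.foldl pvStepB ([], none)).2) none (some max_syllables)).length).toNat 0

-- ===== PRECONDITION & SPEC =====
def Spec_compute_pingala_address (root_slp1 : String) (max_syllables : Int) (out : List Int) : Prop := out = compute_pingala_address_alt root_slp1 max_syllables
instance (root_slp1 : String) (max_syllables : Int) (out : List Int) : Decidable (Spec_compute_pingala_address root_slp1 max_syllables out) := by unfold Spec_compute_pingala_address; infer_instance

-- ===== CLAIM (what is proved, stated in full; the proofs are below) =====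
def Claim_equal_compute_pingala_address : Prop := ∀ (root_slp1 : String) (max_syllables : Int), Dom_compute_pingala_address root_slp1 max_syllables → Spec_compute_pingala_address root_slp1 max_syllables (compute_pingala_address root_slp1 max_syllables)

-- ===== LEMMAS AND PROOFS =====

-- running the fold from (w, p) and flushing at the end
def pvRunB (cs : List Char) (w : List Int) (p : Option (Bool × Nat)) : List Int :=
  pvFlushB (cs.foldl pvStepB (w, p)).1 (cs.foldl pvStepB (w, p)).2

lemma pvRunB_nil (w : List Int) (p : Option (Bool × Nat)) : pvRunB [] w p = pvFlushB w p := rfl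

lemma pvRunB_cons (c : Char) (cs : List Char) (w : List Int) (p : Option (Bool × Nat)) :
    pvRunB (c :: cs) w p = pvRunB cs (pvStepB (w, p) c).1 (pvStepB (w, p) c).2 := rfl

lemma pv_vowel_iff (c : Char) : c ∈ pvVowelsB ↔ (c ∈ pvLongVowels ∨ c ∈ pvShortVowels) := by
  simp only [pvVowelsB, pvLongVowels, pvShortVowels, List.mem_cons, List.not_mem_nil, or_false]
  tauto

lemma pv_vowel_not_cons (c : Char) (h : c ∈ pvVowelsB) : c ∉ pvConsonants := by
  simp only [pvVowelsB, List.mem_cons, List.not_mem_nil, or_false] at h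
  rcases h with h|h|h|h|h|h|h|h|h|h|h <;> subst h <;> decide

-- main invariant: the state-machine fold from a given state computes A's loop
lemma pvRunB_spec : ∀ (cs : List Char) (w : List Int),
    (pvRunB cs w none = w ++ pvLoopA cs) ∧
    (∀ lg cnt, pvRunB cs w (some (lg, cnt)) =
      (w ++ [pvWeightB (lg, cnt + pvClusterA cs)]) ++ pvLoopA (cs.drop (pvClusterA cs))) := by
  intro cs
  induction cs with
  | nil =>
      intro w
      constructor
      · simp [pvRunB_nil, pvFlushB, pvLoopA]
      · intro lg cnt; simp [pvRunB_nil, pvFlushB, pvLoopA, pvClusterA]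
  | cons c rest ih =>
      intro w
      by_cases hvB : c ∈ pvVowelsB
      · -- c is a vowel
        have hv : c ∈ pvLongVowels ∨ c ∈ pvShortVowels := (pv_vowel_iff c).1 hvB
        have hnc : c ∉ pvConsonants := pv_vowel_not_cons c hvB
        have hstep : ∀ (w' : List Int) (p : Option (Bool × Nat)),
            pvStepB (w', p) c = (pvFlushB w' p, some (decide (c ∈ pvLongVowels), 0)) := by
          intro w' p; simp [pvStepB, hvB]
        constructor
        · rw [pvRunB_cons, hstep]
          rw [show (pvFlushB w none, some (decide (c ∈ pvLongVowels), (0:Nat))).1 = pvFlushB w none from rfl]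
          rw [(ih (pvFlushB w none)).2 (decide (c ∈ pvLongVowels)) 0]
          simp only [pvFlushB]
          rw [pvLoopA, if_pos hv]
          simp [pvWeightB]
        · intro lg cnt
          rw [pvRunB_cons, hstep]
          rw [show (pvFlushB w (some (lg, cnt)), some (decide (c ∈ pvLongVowels), (0:Nat))).1 = pvFlushB w (some (lg, cnt)) from rfl]
          rw [(ih (pvFlushB w (some (lg, cnt)))).2 (decide (c ∈ pvLongVowels)) 0]
          have hcl : pvClusterA (c :: rest) = 0 := by simp [pvClusterA, hnc]
          rw [hcl]
          simp only [List.drop_zero, pvFlushB]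
          rw [pvLoopA, if_pos hv]
          simp [pvWeightB]
      · -- c is not a vowel
        have hnv : ¬ (c ∈ pvLongVowels ∨ c ∈ pvShortVowels) := fun h => hvB ((pv_vowel_iff c).2 h)
        constructor
        · rw [pvRunB_cons]
          simp only [pvStepB]
          rw [if_neg hvB]
          rw [pvLoopA, if_neg hnv]
          exact (ih w).1
        · intro lg cnt
          rw [pvRunB_cons]
          simp only [pvStepB]
          rw [if_neg hvB]
          by_cases hc : c ∈ pvConsonants
          · rw [if_pos hc]
            rw [(ih w).2 lg (cnt + 1)]
            have hcl : pvClusterA (c :: rest) = pvClusterA rest + 1 := by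
              simp [pvClusterA, hc]
            rw [hcl]
            have h2 : cnt + 1 + pvClusterA rest = cnt + (pvClusterA rest + 1) := by omega
            rw [h2]
            simp [List.drop_succ_cons]
          · rw [if_neg hc]
            rw [(ih (w ++ [pvWeightB (lg, cnt)])).1]
            have hcl : pvClusterA (c :: rest) = 0 := by simp [pvClusterA, hc]
            rw [hcl]
            simp only [List.drop_zero]
            rw [pvLoopA, if_neg hnv]
            simp

-- the pad loop is append-replicate
lemma pvPadA_eq (addr : List Int) (m : Int) :
    pvPadA addr m = addr ++ List.replicate (m - addr.length).toNat 0 := by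
  by_cases h : (addr.length : Int) < m
  · rw [pvPadA, if_pos h, pvPadA_eq (addr ++ [(0 : Int)]) m]
    have : (m - addr.length).toNat = (m - (addr ++ [(0:Int)]).length).toNat + 1 := by
      simp; omega
    rw [this, List.replicate_succ]
    simp
  · rw [pvPadA, if_neg h]
    have : (m - addr.length).toNat = 0 := by omega
    simp [this]
  termination_by (m - addr.length).toNat
  decreasing_by simp; omega

-- ===== VERDICT (by name: the statement is the Claim_ definition above) =====
theorem compute_pingala_address_spec : Claim_equal_compute_pingala_address := by
  intro s m _
  unfold Spec_compute_pingala_address compute_pingala_address compute_pingala_address_alt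
  have hw : pvFlushB (s.toList.foldl pvStepB ([], none)).1 (s.toList.foldl pvStepB ([], none)).2
      = pvLoopA s.toList := by
    have := (pvRunB_spec s.toList []).1
    simpa [pvRunB] using this
  rw [hw, pvPadA_eq]
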